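-- pv_equiv track=rewrite | github.com/inamprograms/LeetCode-Problems | 1763-longest-nice-substring/1763-longest-nice-substring.py | niceString
-- ===== SOURCE A (Python) =====
-- def niceString(s: str):
--     char_set = set(s)
--     for ch in s:
--         if ch.islower() and ch.upper() not in char_set:
--             return False
--         if ch.isupper() and ch.lower() not in char_set:
--             return False
--     return True
-- ===== SOURCE B (Python) =====
-- def niceString(s: str):
--     return set(s) == set(s.swapcase())
-- ===== Notes on version B (the rewrite author's own statement) =====
-- stated objective: simpler
-- what changed: Replaces the per-character scan with early returns by a single closed-form set comparison: the character set of s equals the character set of s.swapcase().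
import Mathlib
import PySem

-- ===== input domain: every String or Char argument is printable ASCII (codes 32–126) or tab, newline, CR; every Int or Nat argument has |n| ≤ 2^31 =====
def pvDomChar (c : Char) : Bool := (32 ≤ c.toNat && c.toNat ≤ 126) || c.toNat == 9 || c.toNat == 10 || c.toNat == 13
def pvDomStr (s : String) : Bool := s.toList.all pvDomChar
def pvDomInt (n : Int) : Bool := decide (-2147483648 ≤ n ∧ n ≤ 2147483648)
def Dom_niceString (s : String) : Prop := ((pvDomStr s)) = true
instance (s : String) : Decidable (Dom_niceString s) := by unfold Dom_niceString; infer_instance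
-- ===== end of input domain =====

-- B replaces A's per-character scan with early returns by one closed-form comparison:
-- set(s) == set(s.swapcase()); same O(n) cost, simpler shape.


-- ===== PORT A =====
-- the 'for ch in s' loop with its two early 'return False' branches
def niceLoopA (cs : List Char) (charSet : PySem.Set Char) : Bool :=
  match cs with
  | [] => true
  | ch :: rest =>
    if PySem.Chars.islower ch && !(PySem.Set.contains charSet (PySem.Chars.upperChar ch)) then
      false
    else if PySem.Chars.isupper ch && !(PySem.Set.contains charSet (PySem.Chars.lowerChar ch)) then
      false
    else
      niceLoopA rest charSet

def niceString (s : String) : Bool :=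
  let charSet : PySem.Set Char := PySem.Set.ofList s.toList
  niceLoopA s.toList charSet

-- ===== PORT B =====
-- str.swapcase() applied to one character (exact on the ASCII domain)
def swapChar (c : Char) : Char :=
  if PySem.Chars.islower c then PySem.Chars.upperChar c
  else if PySem.Chars.isupper c then PySem.Chars.lowerChar c
  else c

def niceString_alt (s : String) : Bool :=
  PySem.Set.equal (PySem.Set.ofList s.toList) (PySem.Set.ofList (s.toList.map swapChar))

-- ===== PRECONDITION & SPEC =====
def Spec_niceString (s : String) (out : Bool) : Prop := out = niceString_alt s
instance (s : String) (out : Bool) : Decidable (Spec_niceString s out) := by unfold Spec_niceString; infer_instance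

-- ===== CLAIM (what is proved, stated in full; the proofs are below) =====
def Claim_equal_niceString : Prop := ∀ (s : String), Dom_niceString s → Spec_niceString s (niceString s)

-- ===== LEMMAS AND PROOFS =====

lemma islower_iff (c : Char) : PySem.Chars.islower c = true ↔ 97 ≤ c.toNat ∧ c.toNat ≤ 122 := by
  simp only [PySem.Chars.islower, Bool.and_eq_true, decide_eq_true_eq, Char.le_def,
    UInt32.le_iff_toNat_le]
  exact Iff.rfl

lemma isupper_iff (c : Char) : PySem.Chars.isupper c = true ↔ 65 ≤ c.toNat ∧ c.toNat ≤ 90 := by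
  simp only [PySem.Chars.isupper, Bool.and_eq_true, decide_eq_true_eq, Char.le_def,
    UInt32.le_iff_toNat_le]
  exact Iff.rfl

lemma charOfNat_toNat (n : Nat) (h : n < 55296) : (Char.ofNat n).toNat = n := by
  unfold Char.ofNat
  rw [dif_pos (Or.inl h)]
  simp [Char.ofNatAux, Char.toNat]

lemma toNat_upperChar (c : Char) (h : PySem.Chars.islower c = true) :
    (PySem.Chars.upperChar c).toNat = c.toNat - 32 := by
  have hb := (islower_iff c).mp h
  unfold PySem.Chars.upperChar
  rw [if_pos h, charOfNat_toNat _ (by omega)]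

lemma toNat_lowerChar (c : Char) (h : PySem.Chars.isupper c = true) :
    (PySem.Chars.lowerChar c).toNat = c.toNat + 32 := by
  have hb := (isupper_iff c).mp h
  unfold PySem.Chars.lowerChar
  rw [if_pos h, charOfNat_toNat _ (by omega)]

lemma isupper_upperChar (c : Char) (h : PySem.Chars.islower c = true) :
    PySem.Chars.isupper (PySem.Chars.upperChar c) = true := by
  have hb := (islower_iff c).mp h
  rw [isupper_iff, toNat_upperChar c h]; omega

lemma islower_lowerChar (c : Char) (h : PySem.Chars.isupper c = true) :
    PySem.Chars.islower (PySem.Chars.lowerChar c) = true := by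
  have hb := (isupper_iff c).mp h
  rw [islower_iff, toNat_lowerChar c h]; omega

lemma lowerChar_upperChar (c : Char) (h : PySem.Chars.islower c = true) :
    PySem.Chars.lowerChar (PySem.Chars.upperChar c) = c := by
  have hb := (islower_iff c).mp h
  unfold PySem.Chars.lowerChar
  rw [if_pos (isupper_upperChar c h), toNat_upperChar c h]
  have : c.toNat - 32 + 32 = c.toNat := by omega
  rw [this, Char.ofNat_toNat]

lemma upperChar_lowerChar (c : Char) (h : PySem.Chars.isupper c = true) :
    PySem.Chars.upperChar (PySem.Chars.lowerChar c) = c := by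
  have hb := (isupper_iff c).mp h
  unfold PySem.Chars.upperChar
  rw [if_pos (islower_lowerChar c h), toNat_lowerChar c h]
  have : c.toNat + 32 - 32 = c.toNat := by omega
  rw [this, Char.ofNat_toNat]

lemma swapChar_of_lower (c : Char) (h : PySem.Chars.islower c = true) :
    swapChar c = PySem.Chars.upperChar c := by
  unfold swapChar; rw [if_pos h]

lemma swapChar_of_upper (c : Char) (h : PySem.Chars.isupper c = true) :
    swapChar c = PySem.Chars.lowerChar c := by
  unfold swapChar
  have hl : PySem.Chars.islower c = false := by
    have h1 := (isupper_iff c).mp h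
    by_contra hc
    have h2 := (islower_iff c).mp (by revert hc; cases PySem.Chars.islower c <;> simp)
    omega
  rw [if_neg (by simp [hl]), if_pos h]

lemma swapChar_of_other (c : Char) (h1 : PySem.Chars.islower c = false)
    (h2 : PySem.Chars.isupper c = false) : swapChar c = c := by
  unfold swapChar
  rw [if_neg (by simp [h1]), if_neg (by simp [h2])]

-- the loop of A returns true iff every character's opposite case is in charSet
lemma niceLoopA_iff (cs : List Char) (charSet : PySem.Set Char) :
    niceLoopA cs charSet = true ↔
      ∀ c ∈ cs, (PySem.Chars.islower c = true → PySem.Chars.upperChar c ∈ charSet) ∧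
                (PySem.Chars.isupper c = true → PySem.Chars.lowerChar c ∈ charSet) := by
  induction cs with
  | nil => simp [niceLoopA]
  | cons ch rest ih =>
    unfold niceLoopA
    split_ifs with h1 h2
    · simp only [Bool.and_eq_true, Bool.not_eq_eq_eq_not, Bool.not_true] at h1
      constructor
      · intro h; exact absurd h (by simp)
      · intro h
        have := ((h ch (by simp)).1 h1.1)
        have hc : PySem.Set.contains charSet (PySem.Chars.upperChar ch) = true := by
          simp [PySem.Set.contains]; exact this
        rw [hc] at h1; exact absurd h1.2 (by simp)
    · simp only [Bool.and_eq_true, Bool.not_eq_eq_eq_not, Bool.not_true] at h2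
      constructor
      · intro h; exact absurd h (by simp)
      · intro h
        have := ((h ch (by simp)).2 h2.1)
        have hc : PySem.Set.contains charSet (PySem.Chars.lowerChar ch) = true := by
          simp [PySem.Set.contains]; exact this
        rw [hc] at h2; exact absurd h2.2 (by simp)
    · rw [ih]
      constructor
      · intro h
        intro c hc
        rcases List.mem_cons.mp hc with hc | hc
        · subst hc
          constructor
          · intro hl
            by_contra hm
            apply h1
            simp only [Bool.and_eq_true, Bool.not_eq_eq_eq_not, Bool.not_true]
            refine ⟨hl, ?_⟩
            simp [PySem.Set.contains]
            exact hm
          · intro hu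
            by_contra hm
            apply h2
            simp only [Bool.and_eq_true, Bool.not_eq_eq_eq_not, Bool.not_true]
            refine ⟨hu, ?_⟩
            simp [PySem.Set.contains]
            exact hm
        · exact h c hc
      · intro h c hc; exact h c (by simp [hc])

-- the case-closure condition is equivalent to invariance of the character set under swapcase
lemma closure_iff_swap (l : List Char) :
    (∀ c ∈ l, (PySem.Chars.islower c = true → PySem.Chars.upperChar c ∈ l) ∧
              (PySem.Chars.isupper c = true → PySem.Chars.lowerChar c ∈ l)) ↔
    (∀ x, x ∈ l ↔ x ∈ l.map swapChar) := by
  constructor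
  · intro h x
    constructor
    · intro hx
      rcases hl : PySem.Chars.islower x with _ | _
      · rcases hu : PySem.Chars.isupper x with _ | _
        · exact List.mem_map.mpr ⟨x, hx, swapChar_of_other x hl hu⟩
        · have hm := (h x hx).2 hu
          exact List.mem_map.mpr ⟨PySem.Chars.lowerChar x, hm, by
            rw [swapChar_of_lower _ (islower_lowerChar x hu), upperChar_lowerChar x hu]⟩
      · have hm := (h x hx).1 hl
        exact List.mem_map.mpr ⟨PySem.Chars.upperChar x, hm, by
          rw [swapChar_of_upper _ (isupper_upperChar x hl), lowerChar_upperChar x hl]⟩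
    · intro hx
      rcases List.mem_map.mp hx with ⟨y, hy, hxy⟩
      subst hxy
      rcases hl : PySem.Chars.islower y with _ | _
      · rcases hu : PySem.Chars.isupper y with _ | _
        · rw [swapChar_of_other y hl hu]; exact hy
        · rw [swapChar_of_upper y hu]; exact (h y hy).2 hu
      · rw [swapChar_of_lower y hl]; exact (h y hy).1 hl
  · intro h c hc
    constructor
    · intro hl
      have : swapChar c ∈ l.map swapChar := List.mem_map.mpr ⟨c, hc, rfl⟩
      rw [swapChar_of_lower c hl] at this
      exact (h _).mpr this
    · intro hu
      have : swapChar c ∈ l.map swapChar := List.mem_map.mpr ⟨c, hc, rfl⟩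
      rw [swapChar_of_upper c hu] at this
      exact (h _).mpr this

-- ===== VERDICT (by name: the statement is the Claim_ definition above) =====
theorem niceString_spec : Claim_equal_niceString := by
  intro s _
  unfold Spec_niceString niceString niceString_alt
  rw [Bool.eq_iff_iff]
  rw [niceLoopA_iff, PySem.Set.equal_iff]
  simp only [PySem.Set.mem_ofList]
  exact closure_iff_swap s.toList
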